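-- pv_equiv track=rewrite | github.com/progdupeupl/pdp_website | pdp/utils/paginator.py | paginator_range
-- ===== SOURCE A (Python) =====
-- def paginator_range(current, stop, start=1):
--     """Generate a folded paginator range.
--
--     Args:
--         current: current page of the paginator
--         stop: last page of the paginator
--         start: first page of the paginator
--
--     Returns:
--         A list containing integers (page numbers to be displayed) and sometimes
--         some None too (folding point to be displayed as three dots for
--         example).
--
--     Raises:
--         ValueError
--
--     """
--
--     if current > stop:
--         raise ValueError("Current value should not be greater than maximum")
--
--     # Basic case when no folding
--     if stop - start <= 4:
--         return range(start, stop + 1)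
--
--     # Complex case when folding
--     lst = []
--     for i in range(start, stop + 1):
--         # Bounds
--         if i == start or i == stop:
--             lst.append(i)
--             if i == start and not current - start <= 2:
--                 lst.append(None)
--         # Neighbors
--         elif 0 < abs(i - current) <= 1:
--             lst.append(i)
--             if i - current > 0 and not stop - i <= 2:
--                 lst.append(None)
--         # Current
--         elif i == current:
--             lst.append(i)
--         # LOL
--         elif i == stop - 1 and current == stop - 3:
--             lst.append(i)
--         # And ignore all other numbers
--
--     return lst
-- ===== SOURCE B (Python) =====
-- def paginator_range(current, stop, start=1):
--     """Directly emit the folded paginator pages without scanning the full range."""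
--     if current > stop:
--         raise ValueError("Current value should not be greater than maximum")
--     if stop - start <= 4:
--         return range(start, stop + 1)
--     lst = [start]
--     if current - start > 2:
--         lst.append(None)
--     lst.extend(p for p in (current - 1, current, current + 1) if start < p < stop)
--     if start < current + 1 < stop and stop - (current + 1) > 2:
--         lst.append(None)
--     if current == stop - 3:
--         lst.append(stop - 1)
--     lst.append(stop)
--     return lst
-- ===== Notes on version B (the rewrite author's own statement) =====
-- stated objective: faster
-- what changed: B emits the constant-size folded page list (bounds, ellipsis markers, the up-to-three neighbour pages, and the stop-1 special case) directly instead of scanning every page from start to stop and testing each against the fold conditions.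
import Mathlib
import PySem

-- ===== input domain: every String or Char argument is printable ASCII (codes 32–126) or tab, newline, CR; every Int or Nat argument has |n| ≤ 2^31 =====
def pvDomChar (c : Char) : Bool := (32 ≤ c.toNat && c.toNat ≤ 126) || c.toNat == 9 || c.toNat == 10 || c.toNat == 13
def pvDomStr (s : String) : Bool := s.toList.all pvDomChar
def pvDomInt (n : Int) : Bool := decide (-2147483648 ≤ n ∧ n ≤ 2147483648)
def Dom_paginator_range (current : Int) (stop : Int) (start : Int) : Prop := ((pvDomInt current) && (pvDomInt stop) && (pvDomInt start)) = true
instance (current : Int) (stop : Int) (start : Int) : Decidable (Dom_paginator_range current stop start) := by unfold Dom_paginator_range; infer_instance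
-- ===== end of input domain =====

-- B replaces A's scan over the whole page range by directly emitting the O(1) set of
-- displayed pages and fold markers (objective: faster, O(1) vs O(stop-start)).

-- ===== PORT A =====
-- one loop iteration of A's for-loop (branches in A's order)
def pagStep (current : Int) (stop : Int) (start : Int) (lst : List (Option Int)) (i : Int) : List (Option Int) :=
  if i = start ∨ i = stop then
    let lst := lst ++ [some i]
    if i = start ∧ ¬(current - start ≤ 2) then lst ++ [none] else lst
  else if 0 < (i - current).natAbs ∧ (i - current).natAbs ≤ 1 then
    let lst := lst ++ [some i]
    if i - current > 0 ∧ ¬(stop - i ≤ 2) then lst ++ [none] else lst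
  else if i = current then lst ++ [some i]
  else if i = stop - 1 ∧ current = stop - 3 then lst ++ [some i]
  else lst

def paginator_range (current : Int) (stop : Int) (start : Int) : List (Option Int) :=
  -- raise when current > stop is excluded by Pre_
  if stop - start ≤ 4 then
    (PySem.List.pyRange start (stop + 1) 1).map some
  else
    (PySem.List.pyRange start (stop + 1) 1).foldl (pagStep current stop start) []

-- ===== PORT B =====
def paginator_range_alt (current : Int) (stop : Int) (start : Int) : List (Option Int) :=
  if stop - start ≤ 4 then
    (PySem.List.pyRange start (stop + 1) 1).map some
  else
    ([some start] ++ (if current - start > 2 then [none] else []))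
      ++ ([current - 1, current, current + 1].filter
            (fun p => decide (start < p ∧ p < stop))).map some
      ++ (if start < current + 1 ∧ current + 1 < stop ∧ stop - (current + 1) > 2 then [none] else [])
      ++ (if current = stop - 3 then [some (stop - 1)] else [])
      ++ [some stop]

-- ===== PRECONDITION & SPEC =====
-- A raises ValueError exactly when current > stop; Pre_ excludes those inputs.
def Pre_paginator_range (current : Int) (stop : Int) (start : Int) : Prop := current ≤ stop
instance (current : Int) (stop : Int) (start : Int) : Decidable (Pre_paginator_range current stop start) := by unfold Pre_paginator_range; infer_instance
def pvWitness_paginator_range : Int × Int × Int := (3, 10, 1)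

def Spec_paginator_range (current : Int) (stop : Int) (start : Int) (out : List (Option Int)) : Prop := out = paginator_range_alt current stop start
instance (current : Int) (stop : Int) (start : Int) (out : List (Option Int)) : Decidable (Spec_paginator_range current stop start out) := by unfold Spec_paginator_range; infer_instance

-- ===== CLAIM (what is proved, stated in full; the proofs are below) =====
def Claim_equal_paginator_range : Prop := ∀ (current : Int) (stop : Int) (start : Int), Dom_paginator_range current stop start → Pre_paginator_range current stop start → Spec_paginator_range current stop start (paginator_range current stop start)

-- ===== LEMMAS AND PROOFS =====

-- per-iteration chunk appended by A's loop body
def pagF (current : Int) (stop : Int) (start : Int) (i : Int) : List (Option Int) :=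
  if i = start ∨ i = stop then
    if i = start ∧ ¬(current - start ≤ 2) then [some i, none] else [some i]
  else if 0 < (i - current).natAbs ∧ (i - current).natAbs ≤ 1 then
    if i - current > 0 ∧ ¬(stop - i ≤ 2) then [some i, none] else [some i]
  else if i = current then [some i]
  else if i = stop - 1 ∧ current = stop - 3 then [some i]
  else []

theorem pagStep_eq (c t s : Int) (lst : List (Option Int)) (i : Int) :
    pagStep c t s lst i = lst ++ pagF c t s i := by
  unfold pagStep pagF
  split_ifs <;> simp

theorem foldl_pagStep (c t s : Int) : ∀ (l : List Int) (init : List (Option Int)),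
    l.foldl (pagStep c t s) init = init ++ l.flatMap (pagF c t s) := by
  intro l
  induction l with
  | nil => simp
  | cons x xs ih =>
      intro init
      simp [List.foldl_cons, pagStep_eq, ih]

theorem flat_split (F : Int → List (Option Int)) (a m b : Int) (h1 : a ≤ m) (h2 : m ≤ b) :
    (PySem.List.pyRange a b 1).flatMap F
      = (PySem.List.pyRange a m 1).flatMap F ++ (PySem.List.pyRange m b 1).flatMap F := by
  rw [PySem.List.pyRange_one_append a m b h1 h2, List.flatMap_append]

theorem flat_cons (F : Int → List (Option Int)) {a b : Int} (h : a < b) :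
    (PySem.List.pyRange a b 1).flatMap F = F a ++ (PySem.List.pyRange (a + 1) b 1).flatMap F := by
  rw [PySem.List.pyRange_one_cons h, List.flatMap_cons]

theorem pagF_nil (c t s i : Int) (h1 : i ≠ s) (h2 : i ≠ t)
    (h3 : i < c - 1 ∨ c + 1 < i) (h4 : ¬(i = t - 1 ∧ c = t - 3)) :
    pagF c t s i = [] := by
  unfold pagF
  split_ifs <;> first | rfl | omega

theorem flat_nil (c t s a b : Int)
    (h : ∀ i : Int, a ≤ i → i < b → pagF c t s i = []) :
    (PySem.List.pyRange a b 1).flatMap (pagF c t s) = [] := by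
  rw [List.flatMap_eq_nil_iff]
  intro x hx
  rw [PySem.List.mem_pyRange_one] at hx
  exact h x hx.1 hx.2


theorem pagF_at_start (c t s : Int) :
    pagF c t s s = if 2 < c - s then [some s, none] else [some s] := by
  unfold pagF; split_ifs <;> first | rfl | (exfalso; omega)

theorem pagF_at_stop (c t s : Int) (h : t ≠ s) : pagF c t s t = [some t] := by
  unfold pagF; split_ifs <;> first | rfl | (exfalso; omega)

theorem pagF_self (c t s : Int) (h1 : c ≠ s) (h2 : c ≠ t) : pagF c t s c = [some c] := by
  unfold pagF; split_ifs <;> first | rfl | (exfalso; omega)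

theorem pagF_left (c t s : Int) (h1 : c - 1 ≠ s) (h2 : c - 1 ≠ t) :
    pagF c t s (c - 1) = [some (c - 1)] := by
  unfold pagF; split_ifs <;> first | rfl | (exfalso; omega)

theorem pagF_right (c t s : Int) (h1 : c + 1 ≠ s) (h2 : c + 1 ≠ t) :
    pagF c t s (c + 1) = if 2 < t - (c + 1) then [some (c + 1), none] else [some (c + 1)] := by
  unfold pagF; split_ifs <;> first | rfl | (exfalso; omega)

theorem pagF_lol (c t s : Int) (h0 : c = t - 3) (h1 : t - 1 ≠ s) :
    pagF c t s (t - 1) = [some (t - 1)] := by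
  unfold pagF; split_ifs <;> first | rfl | (exfalso; omega)

-- ===== VERDICT (by name: the statement is the Claim_ definition above) =====
theorem paginator_range_spec : Claim_equal_paginator_range := by
  intro c t s _ hpre
  unfold Pre_paginator_range at hpre
  unfold Spec_paginator_range paginator_range paginator_range_alt
  by_cases h4 : t - s <= 4
  · simp [h4]
  rw [if_neg h4, if_neg h4, foldl_pagStep, List.nil_append]
  by_cases ha : c < s
  · -- current below the first page: only the two bounds appear
    rw [flat_cons _ (by omega : s < t + 1),
        flat_split _ (s+1) t (t+1) (by omega) (by omega),
        flat_nil c t s (s+1) t (fun i _ _ => pagF_nil c t s i (by omega) (by omega) (by omega) (by omega)),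
        flat_cons _ (by omega : t < t + 1),
        PySem.List.pyRange_one_eq_nil (by omega : t + 1 <= t + 1),
        pagF_at_start, pagF_at_stop c t s (by omega)]
    simp only [List.flatMap_nil, List.append_nil, List.nil_append, List.filter_cons,
      List.filter_nil, decide_eq_true_eq]
    split_ifs <;> first | (exfalso; omega) | simp
  by_cases hb : c = s
  · -- current is the first page
    rw [flat_cons _ (by omega : s < t + 1),
        flat_cons _ (by omega : s + 1 < t + 1),
        flat_split _ (s+1+1) t (t+1) (by omega) (by omega),
        flat_nil c t s (s+1+1) t (fun i _ _ => pagF_nil c t s i (by omega) (by omega) (by omega) (by omega)),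
        flat_cons _ (by omega : t < t + 1),
        PySem.List.pyRange_one_eq_nil (by omega : t + 1 <= t + 1),
        show s + 1 = c + 1 from by omega,
        pagF_at_start, pagF_right c t s (by omega) (by omega), pagF_at_stop c t s (by omega)]
    simp only [List.flatMap_nil, List.append_nil, List.nil_append, List.filter_cons,
      List.filter_nil, decide_eq_true_eq]
    split_ifs <;> first | (exfalso; omega) | simp
  by_cases hc : c = s + 1
  · -- current just after the first page
    rw [flat_cons _ (by omega : s < t + 1),
        flat_cons _ (by omega : s + 1 < t + 1),
        flat_cons _ (by omega : s + 1 + 1 < t + 1),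
        flat_split _ (s+1+1+1) t (t+1) (by omega) (by omega),
        flat_nil c t s (s+1+1+1) t (fun i _ _ => pagF_nil c t s i (by omega) (by omega) (by omega) (by omega)),
        flat_cons _ (by omega : t < t + 1),
        PySem.List.pyRange_one_eq_nil (by omega : t + 1 <= t + 1),
        show s + 1 + 1 = c + 1 from by omega, show s + 1 = c from by omega,
        pagF_at_start, pagF_self c t s (by omega) (by omega),
        pagF_right c t s (by omega) (by omega), pagF_at_stop c t s (by omega)]
    simp only [List.flatMap_nil, List.append_nil, List.nil_append, List.filter_cons,
      List.filter_nil, decide_eq_true_eq]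
    split_ifs <;> first | (exfalso; omega) | simp
  by_cases hd : c <= t - 4
  · -- generic middle position
    rw [flat_cons _ (by omega : s < t + 1),
        flat_split _ (s+1) (c-1) (t+1) (by omega) (by omega),
        flat_nil c t s (s+1) (c-1) (fun i _ _ => pagF_nil c t s i (by omega) (by omega) (by omega) (by omega)),
        flat_cons _ (by omega : c - 1 < t + 1),
        flat_cons _ (by omega : c - 1 + 1 < t + 1),
        flat_cons _ (by omega : c - 1 + 1 + 1 < t + 1),
        flat_split _ (c-1+1+1+1) t (t+1) (by omega) (by omega),
        flat_nil c t s (c-1+1+1+1) t (fun i _ _ => pagF_nil c t s i (by omega) (by omega) (by omega) (by omega)),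
        flat_cons _ (by omega : t < t + 1),
        PySem.List.pyRange_one_eq_nil (by omega : t + 1 <= t + 1),
        show c - 1 + 1 + 1 = c + 1 from by omega, show c - 1 + 1 = c from by omega,
        pagF_at_start, pagF_left c t s (by omega) (by omega), pagF_self c t s (by omega) (by omega),
        pagF_right c t s (by omega) (by omega), pagF_at_stop c t s (by omega)]
    simp only [List.flatMap_nil, List.append_nil, List.nil_append, List.filter_cons,
      List.filter_nil, decide_eq_true_eq]
    split_ifs <;> first | (exfalso; omega) | simp
  by_cases he : c = t - 3
  · -- the special 'LOL' branch: stop-1 is also shown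
    rw [flat_cons _ (by omega : s < t + 1),
        flat_split _ (s+1) (c-1) (t+1) (by omega) (by omega),
        flat_nil c t s (s+1) (c-1) (fun i _ _ => pagF_nil c t s i (by omega) (by omega) (by omega) (by omega)),
        flat_cons _ (by omega : c - 1 < t + 1),
        flat_cons _ (by omega : c - 1 + 1 < t + 1),
        flat_cons _ (by omega : c - 1 + 1 + 1 < t + 1),
        flat_cons _ (by omega : c - 1 + 1 + 1 + 1 < t + 1),
        flat_cons _ (by omega : c - 1 + 1 + 1 + 1 + 1 < t + 1),
        PySem.List.pyRange_one_eq_nil (by omega : t + 1 <= c - 1 + 1 + 1 + 1 + 1 + 1),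
        show c - 1 + 1 + 1 + 1 + 1 = t from by omega, show c - 1 + 1 + 1 + 1 = t - 1 from by omega,
        show c - 1 + 1 + 1 = c + 1 from by omega, show c - 1 + 1 = c from by omega,
        pagF_at_start, pagF_left c t s (by omega) (by omega), pagF_self c t s (by omega) (by omega),
        pagF_right c t s (by omega) (by omega), pagF_lol c t s (by omega) (by omega),
        pagF_at_stop c t s (by omega)]
    simp only [List.flatMap_nil, List.append_nil, List.nil_append, List.filter_cons,
      List.filter_nil, decide_eq_true_eq]
    split_ifs <;> first | (exfalso; omega) | simp
  by_cases hf : c = t - 2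
  ·
    rw [flat_cons _ (by omega : s < t + 1),
        flat_split _ (s+1) (c-1) (t+1) (by omega) (by omega),
        flat_nil c t s (s+1) (c-1) (fun i _ _ => pagF_nil c t s i (by omega) (by omega) (by omega) (by omega)),
        flat_cons _ (by omega : c - 1 < t + 1),
        flat_cons _ (by omega : c - 1 + 1 < t + 1),
        flat_cons _ (by omega : c - 1 + 1 + 1 < t + 1),
        flat_cons _ (by omega : c - 1 + 1 + 1 + 1 < t + 1),
        PySem.List.pyRange_one_eq_nil (by omega : t + 1 <= c - 1 + 1 + 1 + 1 + 1),
        show c - 1 + 1 + 1 + 1 = t from by omega, show c - 1 + 1 + 1 = c + 1 from by omega,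
        show c - 1 + 1 = c from by omega,
        pagF_at_start, pagF_left c t s (by omega) (by omega), pagF_self c t s (by omega) (by omega),
        pagF_right c t s (by omega) (by omega), pagF_at_stop c t s (by omega)]
    simp only [List.flatMap_nil, List.append_nil, List.nil_append, List.filter_cons,
      List.filter_nil, decide_eq_true_eq]
    split_ifs <;> first | (exfalso; omega) | simp
  by_cases hg : c = t - 1
  ·
    rw [flat_cons _ (by omega : s < t + 1),
        flat_split _ (s+1) (c-1) (t+1) (by omega) (by omega),
        flat_nil c t s (s+1) (c-1) (fun i _ _ => pagF_nil c t s i (by omega) (by omega) (by omega) (by omega)),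
        flat_cons _ (by omega : c - 1 < t + 1),
        flat_cons _ (by omega : c - 1 + 1 < t + 1),
        flat_cons _ (by omega : c - 1 + 1 + 1 < t + 1),
        PySem.List.pyRange_one_eq_nil (by omega : t + 1 <= c - 1 + 1 + 1 + 1),
        show c - 1 + 1 + 1 = t from by omega, show c - 1 + 1 = c from by omega,
        pagF_at_start, pagF_left c t s (by omega) (by omega), pagF_self c t s (by omega) (by omega),
        pagF_at_stop c t s (by omega)]
    simp only [List.flatMap_nil, List.append_nil, List.nil_append, List.filter_cons,
      List.filter_nil, decide_eq_true_eq]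
    split_ifs <;> first | (exfalso; omega) | simp
  -- remaining case: c = t
  rw [flat_cons _ (by omega : s < t + 1),
      flat_split _ (s+1) (c-1) (t+1) (by omega) (by omega),
      flat_nil c t s (s+1) (c-1) (fun i _ _ => pagF_nil c t s i (by omega) (by omega) (by omega) (by omega)),
      flat_cons _ (by omega : c - 1 < t + 1),
      flat_cons _ (by omega : c - 1 + 1 < t + 1),
      PySem.List.pyRange_one_eq_nil (by omega : t + 1 <= c - 1 + 1 + 1),
      show c - 1 + 1 = t from by omega,
      pagF_at_start, pagF_left c t s (by omega) (by omega), pagF_at_stop c t s (by omega)]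
  simp only [List.flatMap_nil, List.append_nil, List.nil_append, List.filter_cons,
    List.filter_nil, decide_eq_true_eq]
  split_ifs <;> first | (exfalso; omega) | simp
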